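-- pv_equiv track=rewrite | github.com/mohammadfaiizan/ProjectI | DSA/Problem/Queue_Stack/04_Deque_Double_Ended_Queue/1425_Constrained_Subsequence_Sum.py | constrainedSubsetSum_greedy_approach
-- ===== SOURCE A (Python) =====
-- from typing import List, Deque
--
-- def constrainedSubsetSum_greedy_approach(nums: List[int], k: int) -> int:
--     """
--     Approach 7: Greedy with DP
--
--     Greedy selection with DP optimization.
--
--     Time: O(n * k), Space: O(n)
--     """
--     n = len(nums)
--     dp = [float('-inf')] * n
--
--     # Base case
--     dp[0] = nums[0]
--     result = dp[0]
--
--     for i in range(1, n):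
--         # Start new subsequence
--         dp[i] = nums[i]
--
--         # Try extending from previous positions
--         for j in range(max(0, i - k), i):
--             if dp[j] > 0:
--                 dp[i] = max(dp[i], dp[j] + nums[i])
--
--         result = max(result, dp[i])
--
--     return result
-- ===== SOURCE B (Python) =====
-- from typing import List
--
--
-- def constrainedSubsetSum_greedy_approach(nums: List[int], k: int) -> int:
--     # O(n) monotonic-queue DP: dp[i] = nums[i] + max(0, max(dp[i-k:i])),
--     # with the sliding-window maximum kept in a deque (list q + head index h).
--     q = []          # (index, dp value) pairs, dp values strictly decreasing
--     h = 0           # head of the live part of q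
--     best = None
--     for i, x in enumerate(nums):
--         while h < len(q) and q[h][0] < i - k:
--             h += 1
--         cur = x + (q[h][1] if h < len(q) and q[h][1] > 0 else 0)
--         while h < len(q) and q[-1][1] <= cur:
--             q.pop()
--         q.append((i, cur))
--         if best is None or cur > best:
--             best = cur
--     return best
-- ===== Notes on version B (the rewrite author's own statement) =====
-- stated objective: faster
-- what changed: Replaces the O(n*k) inner rescan of dp[i-k:i] by a monotonic-deque sliding-window maximum (dp[i] = nums[i] + max(0, window max)), making the whole DP one O(n) pass; Pre_ excludes only the empty list, on which A raises IndexError.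
import Mathlib
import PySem

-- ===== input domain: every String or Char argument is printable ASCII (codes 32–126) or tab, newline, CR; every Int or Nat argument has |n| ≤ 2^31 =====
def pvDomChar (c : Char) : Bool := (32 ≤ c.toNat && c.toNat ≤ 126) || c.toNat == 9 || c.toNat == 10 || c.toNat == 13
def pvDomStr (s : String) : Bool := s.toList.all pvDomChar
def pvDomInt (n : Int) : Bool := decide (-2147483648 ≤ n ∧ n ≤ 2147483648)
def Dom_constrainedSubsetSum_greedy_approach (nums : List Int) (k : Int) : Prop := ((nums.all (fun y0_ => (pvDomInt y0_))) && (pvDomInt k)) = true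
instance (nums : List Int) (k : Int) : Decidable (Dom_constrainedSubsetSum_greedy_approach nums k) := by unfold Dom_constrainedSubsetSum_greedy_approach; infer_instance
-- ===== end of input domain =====

-- B replaces A's O(n*k) inner rescan of dp[i-k:i] by a monotonic-queue sliding-window
-- maximum, one O(n) pass (objective: faster; measured).

-- ===== PORT A =====
-- outer-loop body of A, named so the proofs can refer to it
def pvStepA (nums : List Int) (k : Int) (st : List Int × Int) (i : Int) : List Int × Int :=
  -- dp[i] = nums[i]
  let dp := PySem.List.pySetD st.1 i (PySem.List.pyGetD nums i 0)
  -- for j in range(max(0, i - k), i): if dp[j] > 0: dp[i] = max(dp[i], dp[j] + nums[i])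
  let dp := (PySem.List.pyRange (max 0 (i - k)) i 1).foldl (fun dp j =>
      if PySem.List.pyGetD dp j 0 > 0 then
        PySem.List.pySetD dp i (max (PySem.List.pyGetD dp i 0) (PySem.List.pyGetD dp j 0 + PySem.List.pyGetD nums i 0))
      else dp) dp
  -- result = max(result, dp[i])
  (dp, max st.2 (PySem.List.pyGetD dp i 0))

def constrainedSubsetSum_greedy_approach (nums : List Int) (k : Int) : Int :=
  let n : Int := (nums.length : Int)
  -- dp = [float('-inf')] * n : the -inf placeholder is never read before being
  -- assigned (every read dp[j] has j < i and position j is assigned before step i),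
  -- so a 0 placeholder is exact
  let dp : List Int := List.replicate nums.length 0
  -- dp[0] = nums[0]  (IndexError on the empty list: excluded by Pre_)
  let dp := PySem.List.pySetD dp 0 (PySem.List.pyGetD nums 0 0)
  let result : Int := PySem.List.pyGetD dp 0 0
  let st := (PySem.List.pyRange 1 n 1).foldl (pvStepA nums k) (dp, result)
  st.2

-- ===== PORT B =====
-- while h < len(q) and q[h][0] < t: h += 1
def pvEvict (q : List (Int × Int)) (t : Int) (h : Nat) : Nat :=
  if hlt : h < q.length then
    if (q[h]'hlt).1 < t then pvEvict q t (h + 1) else h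
  else h
termination_by q.length - h

-- while h < len(q) and q[-1][1] <= cur: q.pop()
def pvPopTail (q : List (Int × Int)) (h : Nat) (cur : Int) : List (Int × Int) :=
  if h < q.length ∧ (PySem.List.pyGetD q (-1) (0, 0)).2 ≤ cur then
    pvPopTail q.dropLast h cur
  else q
termination_by q.length
decreasing_by simp only [List.length_dropLast]; omega

-- loop body of B (state: queue q, head index h, running best)
def pvStepB (k : Int) (st : List (Int × Int) × Nat × Option Int) (ix : Int × Int) :
    List (Int × Int) × Nat × Option Int :=
  let h := pvEvict st.1 (ix.1 - k) st.2.1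
  -- cur = x + (q[h][1] if h < len(q) and q[h][1] > 0 else 0)
  let cur : Int := ix.2 + (match st.1[h]? with
    | some p => if p.2 > 0 then p.2 else 0
    | none => 0)
  let q := pvPopTail st.1 h cur
  (q ++ [(ix.1, cur)], h,
    -- if best is None or cur > best: best = cur
    match st.2.2 with
    | none => some cur
    | some b => some (if cur > b then cur else b))

def constrainedSubsetSum_greedy_approach_alt (nums : List Int) (k : Int) : Int :=
  let st := (PySem.List.enumerate nums 0).foldl (pvStepB k) ([], 0, none)
  match st.2.2 with
  | some b => b
  | none => 0   -- Python B returns None here (nums = []): excluded by Pre_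

-- ===== PRECONDITION & SPEC =====
-- Pre_ excludes only the empty list, on which A raises IndexError (dp[0]).
def Pre_constrainedSubsetSum_greedy_approach (nums : List Int) (k : Int) : Prop := nums ≠ []
instance (nums : List Int) (k : Int) : Decidable (Pre_constrainedSubsetSum_greedy_approach nums k) := by unfold Pre_constrainedSubsetSum_greedy_approach; infer_instance

def pvWitness_constrainedSubsetSum_greedy_approach : List Int × Int := ([3, -5, 2, 7, -4, 1], 2)

def Spec_constrainedSubsetSum_greedy_approach (nums : List Int) (k : Int) (out : Int) : Prop := out = constrainedSubsetSum_greedy_approach_alt nums k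
instance (nums : List Int) (k : Int) (out : Int) : Decidable (Spec_constrainedSubsetSum_greedy_approach nums k out) := by unfold Spec_constrainedSubsetSum_greedy_approach; infer_instance

-- ===== CLAIM (what is proved, stated in full; the proofs are below) =====
def Claim_equal_constrainedSubsetSum_greedy_approach : Prop := ∀ (nums : List Int) (k : Int), Dom_constrainedSubsetSum_greedy_approach nums k → Pre_constrainedSubsetSum_greedy_approach nums k → Spec_constrainedSubsetSum_greedy_approach nums k (constrainedSubsetSum_greedy_approach nums k)

-- ===== LEMMAS AND PROOFS =====

-- Reference description shared by both proofs: dp value list built left to right,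
-- dp[i] = nums[i] + max(0, max(dp[i-k:i])).

-- max(0, max of the last-k window) of the dp prefix acc
def pvWin (k : Int) (acc : List Int) : Int :=
  (if 0 < k then acc.drop (acc.length - k.toNat) else []).foldl max 0

def pvStepD (k : Int) (acc : List Int) (x : Int) : List Int := acc ++ [x + pvWin k acc]

-- dp values of the first i elements
def pvD (nums : List Int) (k : Int) (i : Nat) : List Int := (nums.take i).foldl (pvStepD k) []

-- running maximum of a dp list (0 is never used: lists are nonempty where it matters)
def pvRun (l : List Int) : Int := match l with | [] => 0 | d :: ds => ds.foldl max d

def pvDget (nums : List Int) (k : Int) (j : Nat) : Int := (pvD nums k nums.length).getD j 0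

theorem pvFoldl_length (k : Int) (l : List Int) (acc : List Int) :
    (l.foldl (pvStepD k) acc).length = acc.length + l.length := by
  induction l generalizing acc with
  | nil => simp
  | cons x t ih => simp [List.foldl_cons, ih, pvStepD]; omega

theorem pvD_length (nums : List Int) (k : Int) (i : Nat) (h : i ≤ nums.length) :
    (pvD nums k i).length = i := by
  simp [pvD, pvFoldl_length, h]

theorem pvD_succ (nums : List Int) (k : Int) (i : Nat) (h : i < nums.length) :
    pvD nums k (i+1) = pvD nums k i ++ [nums.getD i 0 + pvWin k (pvD nums k i)] := by
  unfold pvD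
  rw [List.take_add_one, List.foldl_append]
  have : nums[i]?.toList = [nums.getD i 0] := by
    simp [List.getD, List.getElem?_eq_getElem h]
  rw [this]
  simp [pvStepD]

theorem pvD_take (nums : List Int) (k : Int) (i : Nat) (h : i ≤ nums.length) :
    pvD nums k i = (pvD nums k nums.length).take i := by
  induction hn : nums.length - i generalizing i with
  | zero =>
    have : i = nums.length := by omega
    subst this
    rw [List.take_of_length_le (by rw [pvD_length nums k _ le_rfl])]
  | succ c ih =>
    have hlt : i < nums.length := by omega
    have h2 := ih (i+1) (by omega) (by omega)
    have h1 := pvD_succ nums k i hlt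
    have h3 : pvD nums k i = (pvD nums k (i+1)).take i := by
      rw [h1, List.take_append_of_le_length (by rw [pvD_length nums k i (by omega)]),
        List.take_of_length_le (by rw [pvD_length nums k i (by omega)])]
    rw [h3, h2, List.take_take]
    congr 1; omega

theorem pvDget_eq (nums : List Int) (k : Int) (i j : Nat) (hj : j < i) (hi : i ≤ nums.length) :
    (pvD nums k i).getD j 0 = pvDget nums k j := by
  rw [pvD_take nums k i hi, pvDget]
  simp [List.getD_eq_getElem?_getD, hj]

theorem pvRun_append (l : List Int) (v : Int) (h : l ≠ []) :
    pvRun (l ++ [v]) = max (pvRun l) v := by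
  cases l with
  | nil => simp at h
  | cons d ds => simp [pvRun, List.foldl_append]

theorem pvFoldIf (l : List Int) (x : Int) : ∀ (m : Int), 0 ≤ m →
    l.foldl (fun a d => if d > 0 then max a (d + x) else a) (x + m) = x + l.foldl max m := by
  induction l with
  | nil => intro m _; simp
  | cons d t ih =>
    intro m hm
    simp only [List.foldl_cons]
    by_cases hd : d > 0
    · rw [if_pos hd, show max (x + m) (d + x) = x + max m d from by omega, ih (max m d) (by omega)]
    · rw [if_neg hd, show max m d = m from by omega, ih m hm]

theorem pvFoldIf0 (l : List Int) (x : Int) :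
    l.foldl (fun a d => if d > 0 then max a (d + x) else a) x = x + l.foldl max 0 := by
  have := pvFoldIf l x 0 le_rfl
  simpa using this

theorem pvFoldl_max_le (l : List Int) (init c : Int) (h0 : init ≤ c) (h : ∀ y ∈ l, y ≤ c) :
    l.foldl max init ≤ c := by
  rcases PySem.List.foldl_max_mem l init with he | he
  · omega
  · exact h _ he

-- ----- A side -----

theorem pvGetAt (P R : List Int) (b : Int) :
    PySem.List.pyGetD (P ++ b :: R) (P.length : Int) 0 = b := by
  rw [PySem.List.pyGetD_natCast]
  simp [List.getD_eq_getElem?_getD]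

theorem pvSetAt (P R : List Int) (b v : Int) :
    PySem.List.pySetD (P ++ b :: R) (P.length : Int) v = P ++ v :: R := by
  rw [PySem.List.pySetD_natCast, List.set_append_right _ _ le_rfl]
  simp

theorem pvGetLt (P R : List Int) (b : Int) (j : Int) (h0 : 0 ≤ j) (hj : j < (P.length : Int)) :
    PySem.List.pyGetD (P ++ b :: R) j 0 = PySem.List.pyGetD P j 0 := by
  rw [PySem.List.pyGetD_eq_getElem _ 0 h0 (by simp; omega),
      PySem.List.pyGetD_eq_getElem _ 0 h0 (by omega)]
  exact List.getElem_append_left (by omega)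

theorem pvInnerShape (js : List Int) (P R : List Int) (x i : Int) (hi : i = (P.length : Int))
    (hjs : ∀ j ∈ js, 0 ≤ j ∧ j < i) : ∀ (a : Int),
    js.foldl (fun dp j => if PySem.List.pyGetD dp j 0 > 0 then
        PySem.List.pySetD dp i (max (PySem.List.pyGetD dp i 0) (PySem.List.pyGetD dp j 0 + x))
      else dp) (P ++ a :: R)
    = P ++ (js.foldl (fun b j => if PySem.List.pyGetD P j 0 > 0 then max b (PySem.List.pyGetD P j 0 + x) else b) a) :: R := by
  subst hi
  induction js with
  | nil => intro a; simp
  | cons j t ih =>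
    intro a
    have hj := hjs j (by simp)
    have hget := pvGetLt P R a j hj.1 hj.2
    simp only [List.foldl_cons, hget, pvGetAt P R a]
    by_cases hpos : PySem.List.pyGetD P j 0 > 0
    · rw [if_pos hpos, if_pos hpos, pvSetAt]
      exact ih (fun j hj => hjs j (by simp [hj])) _
    · rw [if_neg hpos, if_neg hpos]
      exact ih (fun j hj => hjs j (by simp [hj])) _

theorem pvStepA_eq (nums : List Int) (k : Int) (iN : Nat) (h1 : 1 ≤ iN) (h2 : iN < nums.length) :
    pvStepA nums k (pvD nums k iN ++ List.replicate (nums.length - iN) 0, pvRun (pvD nums k iN)) (iN : Int)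
    = (pvD nums k (iN+1) ++ List.replicate (nums.length - (iN+1)) 0, pvRun (pvD nums k (iN+1))) := by
  set P := pvD nums k iN with hPdef
  have hP : P.length = iN := pvD_length nums k iN (le_of_lt h2)
  set R := List.replicate (nums.length - (iN+1)) (0:Int) with hRdef
  have hrep : List.replicate (nums.length - iN) (0:Int) = 0 :: R := by
    rw [hRdef, show nums.length - iN = (nums.length - (iN+1)) + 1 from by omega, List.replicate_succ]
  have hcast : (iN : Int) = (P.length : Int) := by rw [hP]
  unfold pvStepA
  simp only [hrep]
  rw [hcast]
  set x := PySem.List.pyGetD nums (P.length : Int) 0 with hxdef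
  have hx : x = nums.getD iN 0 := by
    rw [hxdef, ← hcast]; exact PySem.List.pyGetD_natCast nums iN 0
  rw [pvSetAt P R 0 x]
  rw [pvInnerShape _ P R x _ rfl
    (fun j hj => by
      rw [PySem.List.mem_pyRange_one] at hj
      constructor
      · exact le_trans (le_max_left 0 _) hj.1
      · exact hj.2) x]
  have hfold := PySem.List.foldl_pyRange_pyGetD' P 0
    (fun b d => if d > 0 then max b (d + x) else b) x
    (a := max 0 ((P.length : Int) - k)) (le_max_left 0 _)
  rw [hfold, pvFoldIf0]
  have hdrop : P.drop (max 0 ((P.length : Int) - k)).toNat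
      = (if 0 < k then P.drop (P.length - k.toNat) else []) := by
    by_cases hk : 0 < k
    · rw [if_pos hk]; congr 1; omega
    · rw [if_neg hk]
      apply List.drop_eq_nil_of_le
      omega
  rw [hdrop]
  have hval : x + (if 0 < k then P.drop (P.length - k.toNat) else []).foldl max 0
      = nums.getD iN 0 + pvWin k P := by rw [hx, pvWin]
  rw [hval]
  have hsucc := pvD_succ nums k iN h2
  simp only [Prod.mk.injEq]
  constructor
  · rw [hsucc, ← hPdef, List.append_cons]
  · rw [pvGetAt, hsucc, pvRun_append P _ (by intro hnil; rw [hnil] at hP; simp at hP; omega)]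

theorem pvA_loop (nums : List Int) (k : Int) (c : Nat) : ∀ (iN : Nat), 1 ≤ iN → iN + c = nums.length →
    ((PySem.List.pyRange (iN : Int) (nums.length : Int) 1).foldl (pvStepA nums k)
      (pvD nums k iN ++ List.replicate (nums.length - iN) 0, pvRun (pvD nums k iN))).2
    = pvRun (pvD nums k nums.length) := by
  induction c with
  | zero =>
    intro iN h1 h2
    rw [PySem.List.pyRange_one_eq_nil (by omega)]
    simp only [List.foldl_nil]
    rw [show iN = nums.length from by omega]
  | succ c ih =>
    intro iN h1 h2
    have hlt : iN < nums.length := by omega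
    rw [PySem.List.pyRange_one_cons (by exact_mod_cast hlt)]
    simp only [List.foldl_cons]
    rw [pvStepA_eq nums k iN h1 hlt]
    have : ((iN : Int) + 1) = ((iN + 1 : Nat) : Int) := by push_cast; ring
    rw [this]
    exact ih (iN + 1) (by omega) (by omega)

theorem pvA_eq (nums : List Int) (k : Int) (h : nums ≠ []) :
    constrainedSubsetSum_greedy_approach nums k = pvRun (pvD nums k nums.length) := by
  cases nums with
  | nil => exact absurd rfl h
  | cons a t =>
    unfold constrainedSubsetSum_greedy_approach
    simp only [List.length_cons, List.replicate_succ]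
    rw [PySem.List.pySetD_of_nonneg _ _ (by norm_num)]
    have hd1 : pvD (a :: t) k 1 = [a] := by
      simp [pvD, pvStepD, pvWin]
    have hstate : ((0:Int) :: List.replicate t.length 0).set (0:Int).toNat (PySem.List.pyGetD (a :: t) 0 0)
        = pvD (a :: t) k 1 ++ List.replicate ((a :: t).length - 1) 0 := by
      simp [PySem.List.pyGetD_zero_cons, hd1]
    rw [hstate]
    have hres : PySem.List.pyGetD (pvD (a :: t) k 1 ++ List.replicate ((a :: t).length - 1) 0) 0 0
        = pvRun (pvD (a :: t) k 1) := by
      simp [hd1, PySem.List.pyGetD_zero_cons, pvRun]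
    rw [hres]
    have := pvA_loop (a :: t) k ((a :: t).length - 1) 1 le_rfl (by simp; omega)
    simpa using this

-- ----- B side -----

theorem pvEvict_le (q : List (Int × Int)) (t : Int) : ∀ (h : Nat), h ≤ q.length → pvEvict q t h ≤ q.length := by
  intro h
  induction hn : q.length - h generalizing h with
  | zero =>
    intro hh
    rw [pvEvict, dif_neg (by omega)]
    omega
  | succ n ih =>
    intro hh
    have hlt : h < q.length := by omega
    rw [pvEvict, dif_pos hlt]
    by_cases hc : (q[h]'hlt).1 < t
    · rw [if_pos hc]; exact ih (h+1) (by omega) (by omega)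
    · rw [if_neg hc]; omega

theorem pvEvict_drop (q : List (Int × Int)) (t : Int) : ∀ (h : Nat),
    q.drop (pvEvict q t h) = (q.drop h).dropWhile (fun p => decide (p.1 < t)) := by
  intro h
  induction hn : q.length - h generalizing h with
  | zero =>
    rw [pvEvict, dif_neg (by omega)]
    rw [List.drop_eq_nil_of_le (by omega)]
    simp
  | succ n ih =>
    have hlt : h < q.length := by omega
    rw [pvEvict, dif_pos hlt, List.drop_eq_getElem_cons hlt]
    by_cases hc : (q[h]'hlt).1 < t
    · rw [if_pos hc, List.dropWhile_cons_of_pos (by simpa using hc)]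
      exact ih (h+1) (by omega)
    · rw [if_neg hc, List.dropWhile_cons_of_neg (by simpa using hc)]
      exact List.drop_eq_getElem_cons hlt

theorem pvDropDropLast {α : Type} (q : List α) (h : Nat) : q.dropLast.drop h = (q.drop h).dropLast := by
  rw [List.dropLast_eq_take, List.dropLast_eq_take, List.drop_take, List.length_drop]
  congr 1
  omega

theorem pvDropWhile_head_false {α : Type} (l r : List α) (p : α) (pr : α → Bool)
    (h : l.dropWhile pr = p :: r) : pr p = false := by
  have hw : l.dropWhile pr ≠ [] := by rw [h]; simp
  have h2 := List.head_dropWhile_not pr hw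
  have h4 := List.head?_eq_some_head hw
  have h5 : (l.dropWhile pr).head? = some p := by rw [h]; rfl
  rw [Option.some.inj (h4.symm.trans h5)] at h2
  exact h2

theorem pvPopTail_spec (cur : Int) : ∀ (q : List (Int × Int)) (h : Nat), h ≤ q.length →
    ∃ r, pvPopTail q h cur = q.take h ++ r ∧ r <+: (q.drop h) ∧
      (∀ p ∈ q.drop h, p ∉ r → p.2 ≤ cur) ∧ (∀ hne : r ≠ [], cur < (r.getLast hne).2) := by
  intro q
  induction hn : q.length generalizing q with
  | zero =>
    intro h hh
    have hq : q = [] := List.eq_nil_of_length_eq_zero hn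
    subst hq
    refine ⟨[], ?_, ?_, ?_, ?_⟩ <;> simp [pvPopTail]
  | succ n ih =>
    intro h hh
    by_cases hc : h < q.length ∧ (PySem.List.pyGetD q (-1) (0, 0)).2 ≤ cur
    · have hqne : q ≠ [] := by intro hq; rw [hq] at hn; simp at hn
      have hlast : (PySem.List.pyGetD q (-1) (0, 0)) = q.getLast hqne :=
        PySem.List.pyGetD_neg_one q (0,0) hqne
      rw [pvPopTail, if_pos hc]
      obtain ⟨r, hr1, hr2, hr3, hr4⟩ := ih q.dropLast (by rw [List.length_dropLast]; omega) h (by omega)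
      refine ⟨r, ?_, ?_, ?_, hr4⟩
      · rw [hr1, List.dropLast_eq_take, List.take_take]
        congr 2
        omega
      · rw [pvDropDropLast] at hr2
        exact hr2.trans (List.dropLast_prefix _)
      · intro p hp hpr
        have hdne : q.drop h ≠ [] := by
          intro hx
          have := congrArg List.length hx
          simp at this
          omega
        rw [← List.dropLast_concat_getLast hdne] at hp
        rcases List.mem_append.mp hp with hp1 | hp2
        · exact hr3 p (by rw [pvDropDropLast]; exact hp1) hpr
        · have hp2' : p = (q.drop h).getLast hdne := List.mem_singleton.mp hp2
          rw [hp2', List.getLast_drop]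
          rw [hlast] at hc
          exact hc.2
    · rw [pvPopTail, if_neg hc]
      refine ⟨q.drop h, (List.take_append_drop h q).symm, List.prefix_refl _, ?_, ?_⟩
      · intro p hp hpr; exact absurd hp hpr
      · intro hne
        have hlt : h < q.length := by
          rcases Nat.lt_or_ge h q.length with h1 | h1
          · exact h1
          · exact absurd (List.drop_eq_nil_of_le h1) hne
        have hqne : q ≠ [] := by intro hq; rw [hq] at hlt; simp at hlt
        have hnc : ¬ (PySem.List.pyGetD q (-1) (0, 0)).2 ≤ cur := by
          intro hx; exact hc ⟨hlt, hx⟩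
        rw [List.getLast_drop, ← PySem.List.pyGetD_neg_one q (0,0) hqne]
        omega

theorem pvPairwise_last_le (l : List (Int × Int)) (hp : l.Pairwise fun a b => b.2 < a.2)
    (hne : l ≠ []) : ∀ p ∈ l, (l.getLast hne).2 ≤ p.2 := by
  induction l with
  | nil => simp at hne
  | cons a u ih =>
    intro p hp'
    rcases List.pairwise_cons.mp hp with ⟨ha, hu⟩
    cases u with
    | nil =>
      have : p = a := by simpa using hp'
      subst this
      simp
    | cons b u' =>
      rw [List.getLast_cons (by simp)]
      rcases List.mem_cons.mp hp' with rfl | hmem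
      · exact le_of_lt (ha _ (List.getLast_mem _))
      · exact ih hu (by simp) p hmem

def pvInvB (nums : List Int) (k : Int) (i : Nat) (st : List (Int × Int) × Nat × Option Int) : Prop :=
  st.2.1 ≤ st.1.length ∧
  (∀ p ∈ st.1.drop st.2.1, ∃ j : Nat, p.1 = (j : Int) ∧ j < i ∧ p.2 = pvDget nums k j) ∧
  ((st.1.drop st.2.1).Pairwise fun a b => b.2 < a.2) ∧
  (∀ j : Nat, j < i → ((j : Int) < (i : Int) - k ∨ ∃ p ∈ st.1.drop st.2.1, (j : Int) ≤ p.1 ∧ pvDget nums k j ≤ p.2)) ∧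
  st.2.2 = (if i = 0 then none else some (pvRun (pvD nums k i)))

theorem pvB_step (nums : List Int) (k : Int) (i : Nat) (st : List (Int × Int) × Nat × Option Int)
    (hi : i < nums.length) (hinv : pvInvB nums k i st) :
    pvInvB nums k (i+1) (pvStepB k st ((i : Int), nums.getD i 0)) := by
  obtain ⟨q, h, best⟩ := st
  obtain ⟨hh, hent, hpw, hcov, hbest⟩ := hinv
  simp only at hh hent hpw hcov hbest
  subst hbest
  set t : Int := (i : Int) - k with htdef
  set h' := pvEvict q t h with hh'def
  have hh' : h' ≤ q.length := pvEvict_le q t h hh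
  have hdropeq : q.drop h' = (q.drop h).dropWhile (fun p => decide (p.1 < t)) := pvEvict_drop q t h
  -- the dropped prefix consists of stale entries
  have hsplit : (q.drop h).takeWhile (fun p => decide (p.1 < t)) ++ q.drop h' = q.drop h := by
    rw [hdropeq]; exact List.takeWhile_append_dropWhile
  have hstale : ∀ p ∈ (q.drop h).takeWhile (fun p => decide (p.1 < t)), p.1 < t := by
    intro p hp
    simpa using List.mem_takeWhile_imp hp
  have hmem' : ∀ p ∈ q.drop h', p ∈ q.drop h := by
    intro p hp
    rw [← hsplit]; exact List.mem_append_right _ hp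
  have hpw' : (q.drop h').Pairwise fun a b => b.2 < a.2 := by
    rw [hdropeq]; exact hpw.sublist (List.dropWhile_sublist _)
  have hDlen0 : (pvD nums k i).length = i := pvD_length nums k i (le_of_lt hi)
  have hDlen : (pvD nums k i).length = i := hDlen0
  -- the front of the live queue computes the window maximum
  have hfront : (match q[h']? with
      | some p => if p.2 > 0 then p.2 else 0
      | none => 0) = pvWin k (pvD nums k i) := by
    have hhead : q[h']? = (q.drop h').head? := List.head?_drop.symm
    cases ha : q.drop h' with
    | nil =>
      rw [hhead, ha]
      simp only [List.head?_nil]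
      by_cases hk : 0 < k
      · rcases Nat.eq_zero_or_pos i with hi0 | hi1
        · subst hi0; simp [pvWin, pvD]
        · -- every j < i is stale, in particular i-1; contradiction with 0 < k
          exfalso
          rcases hcov (i-1) (by omega) with hl | ⟨pw, hpw1, hpw2, _⟩
          · omega
          · rcases (by rw [← hsplit] at hpw1; exact List.mem_append.mp hpw1 :
                pw ∈ (q.drop h).takeWhile (fun p => decide (p.1 < t)) ∨ pw ∈ q.drop h') with h1 | h2
            · have := hstale pw h1
              omega
            · rw [ha] at h2; simp at h2
      · simp [pvWin, hk]
    | cons p rest =>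
      rw [hhead, ha]
      simp only [List.head?_cons]
      obtain ⟨j₀, hj₀1, hj₀2, hj₀3⟩ := hent p (hmem' p (by rw [ha]; simp))
      have hnotlt : ¬ p.1 < t := by
        have := pvDropWhile_head_false (q.drop h) rest p _ (by rw [← hdropeq, ha])
        simpa using this
      have hk : 0 < k := by omega
      have hkN : k.toNat = k := Int.toNat_of_nonneg (le_of_lt hk)
      have hj₀win : i - k.toNat ≤ j₀ := by omega
      rw [pvWin, if_pos hk, hDlen]
      set D := pvD nums k i with hDdef
      set wl := D.drop (i - k.toNat) with hwldef
      have hDg : ∀ j : Nat, j < i → D.getD j 0 = pvDget nums k j :=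
        fun j hj => pvDget_eq nums k i j hj (le_of_lt hi)
      have hgetD : ∀ j : Nat, (hj : j < i) → D[j]'(by omega) = pvDget nums k j := by
        intro j hj
        rw [← hDg j hj, List.getD_eq_getElem?_getD, List.getElem?_eq_getElem (by omega)]
        simp
      have hwl_le : ∀ v ∈ wl, v ≤ p.2 := by
        intro v hv
        rw [hwldef] at hv
        obtain ⟨r, hr, hvr⟩ := List.mem_iff_getElem.mp hv
        rw [List.getElem_drop] at hvr
        set j := i - k.toNat + r with hjdef
        have hjlt : j < i := by
          have hlen : (D.drop (i - k.toNat)).length = D.length - (i - k.toNat) := by simp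
          omega
        have hvj : v = pvDget nums k j := by rw [← hvr]; exact hgetD j hjlt
        rcases hcov j hjlt with hl | ⟨pw, hpw1, hpw2, hpw3⟩
        · omega
        · rcases (by rw [← hsplit] at hpw1; exact List.mem_append.mp hpw1) with h1 | h2
          · have := hstale pw h1; omega
          · rw [ha] at h2
            rcases List.mem_cons.mp h2 with rfl | hrest
            · rw [hvj]; exact hpw3
            · have : pw.2 < p.2 := (List.pairwise_cons.mp (ha ▸ hpw')).1 pw hrest
              rw [hvj]; omega
      have hp2win : p.2 ∈ wl := by
        rw [hj₀3, ← hgetD j₀ hj₀2, hwldef]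
        have : D[j₀]'(by omega) = (D.drop (i - k.toNat))[j₀ - (i - k.toNat)]'(by
          rw [List.length_drop]; omega) := by
          rw [List.getElem_drop]; congr 1; omega
        rw [this]
        exact List.getElem_mem _
      have hle1 : wl.foldl max 0 ≤ max 0 p.2 := by
        apply pvFoldl_max_le _ _ _ (le_max_left 0 _)
        intro y hy
        exact le_trans (hwl_le y hy) (le_max_right 0 _)
      have hle2 : max 0 p.2 ≤ wl.foldl max 0 := by
        apply max_le (PySem.List.le_foldl_max wl 0).1
        exact (PySem.List.le_foldl_max wl 0).2 p.2 hp2win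
      have : wl.foldl max 0 = max 0 p.2 := le_antisymm hle1 hle2
      rw [this]
      split_ifs with h1 <;> omega
  -- assemble the new state
  set x := nums.getD i 0 with hxdef
  set cur := x + pvWin k (pvD nums k i) with hcurdef
  have hdgeti : pvDget nums k i = cur := by
    have h1 := pvDget_eq nums k (i+1) i (by omega) (by omega)
    rw [pvD_succ nums k i hi] at h1
    rw [← h1, List.getD_eq_getElem?_getD, List.getElem?_append_right (by omega),
      hDlen0]
    simp [hcurdef, hxdef]
  have hstep : pvStepB k (q, h, (if i = 0 then none else some (pvRun (pvD nums k i)))) ((i : Int), x)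
      = (pvPopTail q h' cur ++ [((i : Int), cur)], h',
        (match (if i = 0 then none else some (pvRun (pvD nums k i))) with
          | none => some cur
          | some b => some (if cur > b then cur else b))) := by
    simp only [pvStepB]
    rw [← htdef, ← hh'def, hfront, ← hcurdef]
  rw [hstep]
  obtain ⟨r, hr1, hr2, hr3, hr4⟩ := pvPopTail_spec cur q h' hh'
  have htake : (q.take h').length = h' := by rw [List.length_take]; omega
  have hq2 : pvPopTail q h' cur ++ [((i:Int), cur)] = q.take h' ++ (r ++ [((i:Int), cur)]) := by
    rw [hr1, List.append_assoc]
  have hdrop2 : (pvPopTail q h' cur ++ [((i:Int), cur)]).drop h' = r ++ [((i:Int), cur)] := by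
    rw [hq2]
    exact List.drop_left' htake
  have hrsub : ∀ p ∈ r, p ∈ q.drop h' := fun p hp => hr2.sublist.subset hp
  have hpwr : r.Pairwise fun a b => b.2 < a.2 := hpw'.sublist hr2.sublist
  refine ⟨?_, ?_, ?_, ?_, ?_⟩
  · simp only [hq2, List.length_append, htake]
    omega
  · intro p hp
    simp only [hdrop2] at hp
    rcases List.mem_append.mp hp with hp1 | hp2
    · obtain ⟨j, h1, h2, h3⟩ := hent p (hmem' p (hrsub p hp1))
      exact ⟨j, h1, by omega, h3⟩
    · have : p = ((i:Int), cur) := by simpa using hp2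
      exact ⟨i, by rw [this], by omega, by rw [this, hdgeti]⟩
  · simp only [hdrop2]
    rw [List.pairwise_append]
    refine ⟨hpwr, List.pairwise_singleton _ _, ?_⟩
    intro y hy z hz
    have hz' : z = ((i:Int), cur) := by simpa using hz
    have hne : r ≠ [] := List.ne_nil_of_mem hy
    rw [hz']
    exact lt_of_lt_of_le (hr4 hne) (pvPairwise_last_le r hpwr hne y hy)
  · intro j hj
    simp only [hdrop2]
    by_cases hji : j = i
    · subst hji
      right
      exact ⟨((j:Int), cur), List.mem_append_right _ (by simp), le_refl _, by rw [hdgeti]⟩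
    · rcases hcov j (by omega) with hl | ⟨pw, hpw1, hpw2, hpw3⟩
      · left; omega
      · rcases (by rw [← hsplit] at hpw1; exact List.mem_append.mp hpw1 :
            pw ∈ (q.drop h).takeWhile (fun p => decide (p.1 < t)) ∨ pw ∈ q.drop h') with h1 | h2
        · left
          have := hstale pw h1
          omega
        · by_cases hpr : pw ∈ r
          · right
            exact ⟨pw, List.mem_append_left _ hpr, hpw2, hpw3⟩
          · right
            refine ⟨((i:Int), cur), List.mem_append_right _ (by simp), by omega, ?_⟩
            exact le_trans hpw3 (hr3 pw h2 hpr)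
  · simp only
    have hsucc : pvD nums k (i+1) = pvD nums k i ++ [cur] := by
      rw [pvD_succ nums k i hi, hcurdef, hxdef]
    rcases Nat.eq_zero_or_pos i with hi0 | hi1
    · subst hi0
      rw [if_pos rfl, if_neg (by omega : ¬ (0:Nat) + 1 = 0)]
      have h1 : pvD nums k 1 = [cur] := by rw [hsucc]; rfl
      simp [h1, pvRun]
    · rw [if_neg (by omega : ¬ i = 0), if_neg (by omega : ¬ i + 1 = 0)]
      have hDne : pvD nums k i ≠ [] := by
        intro hx
        have := congrArg List.length hx
        rw [hDlen0] at this
        simp at this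
        omega
      rw [hsucc, pvRun_append _ _ hDne]
      show some (if cur > pvRun (pvD nums k i) then cur else pvRun (pvD nums k i))
        = some (max (pvRun (pvD nums k i)) cur)
      congr 1
      split_ifs with hgt <;> omega

theorem pvB_loop (nums : List Int) (k : Int) : ∀ (rest : List Int) (iN : Nat)
    (st : List (Int × Int) × Nat × Option Int),
    rest = nums.drop iN → pvInvB nums k iN st →
    pvInvB nums k (iN + rest.length) ((PySem.List.enumerate rest (iN : Int)).foldl (pvStepB k) st) := by
  intro rest
  induction rest with
  | nil => intro iN st _ hinv; simpa [PySem.List.enumerate] using hinv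
  | cons x rest' ih =>
    intro iN st hrest hinv
    have hlt : iN < nums.length := by
      by_contra hge
      rw [List.drop_eq_nil_of_le (by omega)] at hrest
      exact List.cons_ne_nil x rest' hrest
    have hx : x = nums.getD iN 0 := by
      have h1 : (nums.drop iN).head? = nums[iN]? := List.head?_drop
      rw [← hrest] at h1
      simp only [List.head?_cons] at h1
      rw [List.getD_eq_getElem?_getD, ← h1]
      rfl
    have hrest' : rest' = nums.drop (iN + 1) := by
      have h1 : (nums.drop iN).tail = nums.drop (iN + 1) := by
        rw [List.tail_drop]
      rw [← hrest] at h1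
      simpa using h1
    rw [PySem.List.enumerate_cons, List.foldl_cons]
    have hstep := pvB_step nums k iN st hlt hinv
    rw [← hx] at hstep
    have hgoal := ih (iN + 1) (pvStepB k st ((iN : Int), x)) hrest' hstep
    rw [show ((iN : Int) + 1) = ((iN + 1 : Nat) : Int) from by push_cast; ring]
    rw [show iN + (x :: rest').length = (iN + 1) + rest'.length from by simp; omega]
    exact hgoal

theorem pvB_eq (nums : List Int) (k : Int) (h : nums ≠ []) :
    constrainedSubsetSum_greedy_approach_alt nums k = pvRun (pvD nums k nums.length) := by
  have hinv0 : pvInvB nums k 0 ([], 0, none) := by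
    refine ⟨by simp, by simp, by simp, ?_, by simp⟩
    intro j hj
    omega
  have hloop := pvB_loop nums k nums 0 ([], 0, none) (by simp) hinv0
  rw [show ((0 : Nat) : Int) = (0 : Int) from by norm_num] at hloop
  obtain ⟨-, -, -, -, hbest⟩ := hloop
  unfold constrainedSubsetSum_greedy_approach_alt
  simp only at hbest ⊢
  rw [hbest, if_neg (by simpa using h)]
  simp

-- ===== VERDICT (by name: the statement is the Claim_ definition above) =====
theorem constrainedSubsetSum_greedy_approach_spec : Claim_equal_constrainedSubsetSum_greedy_approach := by
  intro nums k _ hpre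
  unfold Spec_constrainedSubsetSum_greedy_approach
  rw [pvA_eq nums k hpre, pvB_eq nums k hpre]
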